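-- pv_equiv track=rewrite | github.com/nemocyberworld/assembly-tutor | lessons/number_system/binary_visual.py | render_binary_as_switches
-- ===== SOURCE A (Python) =====
-- RED = "\033[91m"
--
-- GREEN = "\033[92m"
--
-- RESET = "\033[0m"
--
-- def render_binary_as_switches(binary):
--     visual = ""
--     for i, bit in enumerate(binary):
--         label = f"S{i}"
--         if bit == '1':
--             visual += f"{GREEN}{label}: ON  {RESET}"
--         else:
--             visual += f"{RED}{label}: OFF {RESET}"
--         if i % 4 == 3:
--             visual += "\n"
--     return visual.strip()
-- ===== SOURCE B (Python) =====
-- RED = "\033[91m"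
-- GREEN = "\033[92m"
-- RESET = "\033[0m"
--
-- def render_binary_as_switches(binary):
--     def label(i, bit):
--         return (f"{GREEN}S{i}: ON  {RESET}" if bit == '1'
--                 else f"{RED}S{i}: OFF {RESET}")
--     labels = [label(i, bit) for i, bit in enumerate(binary)]
--     lines = ["".join(labels[j:j + 4]) for j in range(0, len(labels), 4)]
--     return "\n".join(lines)
-- ===== Notes on version B (the rewrite author's own statement) =====
-- stated objective: idiomatic
-- what changed: B builds the list of per-bit labels in one comprehension, groups them into four-label lines, and joins the lines with newline separators, instead of A's single stateful loop that appends into one string, inserts a newline after every fourth bit, and strips the conditional trailing newline.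
import Mathlib
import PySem

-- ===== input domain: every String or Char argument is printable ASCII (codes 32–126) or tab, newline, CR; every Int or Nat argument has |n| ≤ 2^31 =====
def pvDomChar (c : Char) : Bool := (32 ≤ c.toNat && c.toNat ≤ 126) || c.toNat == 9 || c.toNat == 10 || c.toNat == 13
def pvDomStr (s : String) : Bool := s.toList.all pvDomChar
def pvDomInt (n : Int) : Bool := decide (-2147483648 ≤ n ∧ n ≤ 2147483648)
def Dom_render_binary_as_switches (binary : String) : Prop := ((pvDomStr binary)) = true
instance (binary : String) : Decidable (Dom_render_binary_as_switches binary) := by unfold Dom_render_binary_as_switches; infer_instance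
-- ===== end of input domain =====

-- B replaces A's single stateful loop (append labels and conditional newlines into one string,
-- then strip) by: build the per-bit label list, chunk it into lines of four, join with '\n'.

def pvESC : Char := Char.ofNat 27
def pvRED : List Char := [pvESC, '[', '9', '1', 'm']
def pvGREEN : List Char := [pvESC, '[', '9', '2', 'm']
def pvRESET : List Char := [pvESC, '[', '0', 'm']

-- ===== PORT A =====
def render_binary_as_switches (binary : String) : String :=
  let visual := (PySem.List.enumerate binary.toList 0).foldl (fun visual p =>
    let label := 'S' :: (PySem.Int.toStr p.1).toList
    let visual := if p.2 = '1'
      then visual ++ pvGREEN ++ label ++ (": ON  ").toList ++ pvRESET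
      else visual ++ pvRED ++ label ++ (": OFF ").toList ++ pvRESET
    if p.1 % 4 = 3 then visual ++ ['\n'] else visual) ([] : List Char)
  String.mk (PySem.Chars.strip visual)

-- ===== PORT B =====
def pvLabel (i : Int) (bit : Char) : List Char :=
  if bit = '1'
    then pvGREEN ++ ('S' :: (PySem.Int.toStr i).toList) ++ (": ON  ").toList ++ pvRESET
    else pvRED ++ ('S' :: (PySem.Int.toStr i).toList) ++ (": OFF ").toList ++ pvRESET

def render_binary_as_switches_alt (binary : String) : String :=
  let labels := (PySem.List.enumerate binary.toList 0).map (fun p => pvLabel p.1 p.2)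
  let lines := (PySem.List.pyRange 0 labels.length 4).map
    (fun j => PySem.Chars.join [] (PySem.List.slice labels (some j) (some (j + 4))))
  String.mk (PySem.Chars.join ['\n'] lines)

-- ===== PRECONDITION & SPEC =====
def Spec_render_binary_as_switches (binary : String) (out : String) : Prop := out = render_binary_as_switches_alt binary
instance (binary : String) (out : String) : Decidable (Spec_render_binary_as_switches binary out) := by unfold Spec_render_binary_as_switches; infer_instance

-- ===== CLAIM (what is proved, stated in full; the proofs are below) =====
def Claim_equal_render_binary_as_switches : Prop := ∀ (binary : String), Dom_render_binary_as_switches binary → Spec_render_binary_as_switches binary (render_binary_as_switches binary)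

-- ===== LEMMAS AND PROOFS =====

-- the per-bit piece A appends to the accumulator
def pvPiece (p : Int × Char) : List Char :=
  pvLabel p.1 p.2 ++ (if p.1 % 4 = 3 then ['\n'] else [])

-- chunks of four
def pvChunk4 {α : Type} : List α → List (List α)
  | [] => []
  | a :: l => (a :: l).take 4 :: pvChunk4 (l.drop 3)
termination_by l => l.length
decreasing_by simp

theorem pvGetLast_cons_append (a : Char) (X Y : List Char) (h : Y.getLast? = some 'm') :
    (a :: (X ++ Y)).getLast? = some 'm' := by
  rw [← List.cons_append, List.getLast?_append_of_ne_nil, h]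
  intro hn; rw [hn] at h; simp at h

theorem pvLabel_head (i : Int) (b : Char) : (pvLabel i b).head? = some pvESC := by
  unfold pvLabel
  split <;> rfl

theorem pvLabel_last (i : Int) (b : Char) : (pvLabel i b).getLast? = some 'm' := by
  unfold pvLabel pvRESET
  split <;>
  · simp [List.getLast?_append]
    exact pvGetLast_cons_append _ _ _ (by decide)

-- a "good" line: nonempty, starts with ESC, ends with 'm'
def pvGood (L : List Char) : Prop := L.head? = some pvESC ∧ L.getLast? = some 'm'

theorem pvGood_ne_nil {L : List Char} (h : pvGood L) : L ≠ [] := by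
  intro hn; rw [hn] at h; simp [pvGood] at h

theorem pvGood_append {L M : List Char} (hL : pvGood L) (hM : pvGood M) : pvGood (L ++ M) := by
  refine ⟨?_, ?_⟩
  · rw [List.head?_append_of_ne_nil _ (pvGood_ne_nil hL)]; exact hL.1
  · rw [List.getLast?_append_of_ne_nil _ (pvGood_ne_nil hM)]; exact hM.2

theorem pvGood_flatten : ∀ (ls : List (List Char)), ls ≠ [] → (∀ L ∈ ls, pvGood L) →
    pvGood ls.flatten := by
  intro ls
  induction ls with
  | nil => intro h; exact absurd rfl h
  | cons a t ih =>
    intro _ hall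
    cases t with
    | nil =>
      simp only [List.flatten_cons, List.flatten_nil, List.append_nil]
      exact hall a (by simp)
    | cons b t' =>
      rw [List.flatten_cons]
      exact pvGood_append (hall a (by simp))
        (ih (by simp) (fun L hL => hall L (List.mem_cons_of_mem a hL)))

theorem pvGood_join : ∀ (ls : List (List Char)), ls ≠ [] → (∀ L ∈ ls, pvGood L) →
    pvGood (PySem.Chars.join ['\n'] ls) := by
  intro ls
  induction ls with
  | nil => intro h; exact absurd rfl h
  | cons a t ih =>
    intro _ hall
    cases t with
    | nil => rw [PySem.Chars.join_singleton]; exact hall a (by simp)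
    | cons b t' =>
      rw [PySem.Chars.join_cons_cons]
      have hrest := ih (by simp) (fun L hL => hall L (List.mem_cons_of_mem a hL))
      refine ⟨?_, ?_⟩
      · rw [List.append_assoc,
          List.head?_append_of_ne_nil _ (pvGood_ne_nil (hall a (by simp)))]
        exact (hall a (by simp)).1
      · rw [List.append_assoc,
          List.getLast?_append_of_ne_nil]
        · rw [List.getLast?_append_of_ne_nil _ (pvGood_ne_nil hrest)]; exact hrest.2
        · simp

theorem pvChunk4_sound {α : Type} : ∀ (n : Nat) (ls : List α), ls.length ≤ n →
    ∀ c ∈ pvChunk4 ls, c ≠ [] ∧ ∀ x ∈ c, x ∈ ls := by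
  intro n
  induction n with
  | zero =>
    intro ls h c hc
    have : ls = [] := List.eq_nil_of_length_eq_zero (Nat.le_zero.mp h)
    subst this; simp [pvChunk4] at hc
  | succ n ih =>
    intro ls h c hc
    cases ls with
    | nil => simp [pvChunk4] at hc
    | cons a l =>
      simp only [pvChunk4] at hc
      rcases List.mem_cons.mp hc with h' | h'
      · subst h'
        exact ⟨by simp, fun x hx => List.mem_of_mem_take hx⟩
      · have hlen : (l.drop 3).length ≤ n := by simp at h ⊢; omega
        obtain ⟨hne, hsub⟩ := ih (l.drop 3) hlen c h'
        exact ⟨hne, fun x hx =>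
          List.mem_cons_of_mem a (List.mem_of_mem_drop (hsub x hx))⟩

theorem pvStrip_good (X : List Char) (h : pvGood X) (flag : List Char)
    (hf : flag = [] ∨ flag = ['\n']) : PySem.Chars.strip (X ++ flag) = X := by
  obtain ⟨hh, hl⟩ := h
  obtain ⟨x, X', rfl⟩ : ∃ x X', X = x :: X' := by
    cases X with
    | nil => simp at hh
    | cons x X' => exact ⟨x, X', rfl⟩
  have hx : x = pvESC := by simpa using hh
  subst hx
  unfold PySem.Chars.strip PySem.Chars.lstrip PySem.Chars.rstrip
  rw [List.cons_append, List.dropWhile_cons_of_neg (by decide)]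
  -- now the rstrip side: reverse ends (starts) with flag.reverse then 'm'
  rw [show (pvESC :: (X' ++ flag)) = (pvESC :: X') ++ flag by simp, List.reverse_append]
  have hmr : ∃ t, (pvESC :: X').reverse = 'm' :: t := by
    have : (pvESC :: X').reverse.head? = some 'm' := by
      rw [List.head?_reverse]; exact hl
    cases hrv : (pvESC :: X').reverse with
    | nil => rw [hrv] at this; simp at this
    | cons y t => rw [hrv] at this; simp at this; exact ⟨t, by rw [this]⟩
  obtain ⟨t, ht⟩ := hmr
  rcases hf with rfl | rfl
  · rw [ht, List.reverse_nil, List.nil_append,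
      List.dropWhile_cons_of_neg (by decide), ← ht]
    simp
  · rw [ht]
    show (List.dropWhile PySem.Chars.isspace (['\n'] ++ 'm' :: t)).reverse = _
    rw [List.cons_append, List.nil_append, List.dropWhile_cons_of_pos (by decide),
      List.dropWhile_cons_of_neg (by decide), ← ht]
    simp

-- A's loop is a flatMap of pvPiece over the enumeration
theorem pvFold_eq_flatMap (l : List (Int × Char)) :
    l.foldl (fun visual p =>
      let label := 'S' :: (PySem.Int.toStr p.1).toList
      let visual := if p.2 = '1'
        then visual ++ pvGREEN ++ label ++ (": ON  ").toList ++ pvRESET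
        else visual ++ pvRED ++ label ++ (": OFF ").toList ++ pvRESET
      if p.1 % 4 = 3 then visual ++ ['\n'] else visual) ([] : List Char)
    = l.flatMap pvPiece := by
  have hstep : ∀ (acc : List Char) (p : Int × Char),
      (let label := 'S' :: (PySem.Int.toStr p.1).toList
       let visual := if p.2 = '1'
         then acc ++ pvGREEN ++ label ++ (": ON  ").toList ++ pvRESET
         else acc ++ pvRED ++ label ++ (": OFF ").toList ++ pvRESET
       if p.1 % 4 = 3 then visual ++ ['\n'] else visual) = acc ++ pvPiece p := by
    intro acc p
    simp only [pvPiece, pvLabel]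
    split_ifs <;> simp
  have hfun : (fun (visual : List Char) (p : Int × Char) =>
      let label := 'S' :: (PySem.Int.toStr p.1).toList
      let visual := if p.2 = '1'
        then visual ++ pvGREEN ++ label ++ (": ON  ").toList ++ pvRESET
        else visual ++ pvRED ++ label ++ (": OFF ").toList ++ pvRESET
      if p.1 % 4 = 3 then visual ++ ['\n'] else visual)
      = (fun acc p => acc ++ pvPiece p) := by
    funext acc p; exact hstep acc p
  rw [hfun, PySem.List.foldl_append_eq_flatMap, List.nil_append]

-- labels of a chunk-aligned enumeration
def pvLabels (l : List Char) (s : Int) : List (List Char) :=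
  (PySem.List.enumerate l s).map (fun p => pvLabel p.1 p.2)

theorem pvLabels_cons (x : Char) (xs : List Char) (s : Int) :
    pvLabels (x :: xs) s = pvLabel s x :: pvLabels xs (s + 1) := by
  simp [pvLabels, PySem.List.enumerate_cons]

-- THE CORE: A's flatMap = B's joined lines, plus a trailing '\n' for nonempty multiples of 4
theorem pvCore : ∀ (n : Nat) (l : List Char) (k : Nat), l.length ≤ n →
    (PySem.List.enumerate l (4 * (k : Int))).flatMap pvPiece =
      PySem.Chars.join ['\n'] ((pvChunk4 (pvLabels l (4 * (k : Int)))).map List.flatten) ++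
      (if l.length % 4 = 0 ∧ l ≠ [] then ['\n'] else []) := by
  intro n
  induction n with
  | zero =>
    intro l k h
    have : l = [] := List.eq_nil_of_length_eq_zero (Nat.le_zero.mp h)
    subst this
    simp [pvLabels, pvChunk4, PySem.Chars.join_nil]
  | succ n ih =>
    intro l k h
    have h0 : ¬ ((4 * (k : Int)) % 4 = 3) := by omega
    have h1 : ¬ ((4 * (k : Int) + 1) % 4 = 3) := by omega
    have h2 : ¬ ((4 * (k : Int) + 1 + 1) % 4 = 3) := by omega
    have h3 : ((4 * (k : Int) + 1 + 1 + 1) % 4 = 3) := by omega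
    match l with
    | [] => simp [pvLabels, pvChunk4, PySem.Chars.join_nil]
    | [a] =>
      simp [PySem.List.enumerate_cons, pvPiece, pvLabels, pvChunk4,
        PySem.Chars.join_singleton]
    | [a, b] =>
      simp [PySem.List.enumerate_cons, pvPiece, pvLabels, pvChunk4,
        PySem.Chars.join_singleton]
    | [a, b, c] =>
      simp [PySem.List.enumerate_cons, pvPiece, h2, pvLabels, pvChunk4,
        PySem.Chars.join_singleton]
    | [a, b, c, d] =>
      simp [PySem.List.enumerate_cons, pvPiece, h2, h3, pvLabels, pvChunk4,
        PySem.Chars.join_singleton]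
    | a :: b :: c :: d :: e :: rest =>
      -- unroll the first four bits
      have hlen : (e :: rest).length ≤ n := by simp at h ⊢; omega
      have hih := ih (e :: rest) (k + 1) hlen
      have hstep : (4 * (k : Int) + 1 + 1 + 1 + 1) = 4 * ((k + 1 : Nat) : Int) := by
        push_cast; ring
      -- the trailing-newline flag is the same for l and for e :: rest
      have hflag : (if (a :: b :: c :: d :: e :: rest).length % 4 = 0 ∧
            (a :: b :: c :: d :: e :: rest) ≠ [] then ['\n'] else ([] : List Char))
          = (if (e :: rest).length % 4 = 0 ∧ (e :: rest) ≠ [] then ['\n'] else []) := by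
        apply if_congr _ rfl rfl
        constructor
        · rintro ⟨hm, -⟩; exact ⟨by simp at hm ⊢; omega, by simp⟩
        · rintro ⟨hm, -⟩; exact ⟨by simp at hm ⊢; omega, by simp⟩
      -- labels of the tail are nonempty, so the chunk list has at least two lines
      have hlabne : pvLabels (e :: rest) (4 * ((k + 1 : Nat) : Int)) ≠ [] := by
        rw [pvLabels_cons]; simp
      -- unroll the first four labels on both sides
      rw [PySem.List.enumerate_cons, PySem.List.enumerate_cons, PySem.List.enumerate_cons,
        PySem.List.enumerate_cons, List.flatMap_cons, List.flatMap_cons, List.flatMap_cons,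
        List.flatMap_cons, hstep, hih, hflag]
      rw [show pvLabels (a :: b :: c :: d :: e :: rest) (4 * (k : Int))
            = pvLabel (4 * (k : Int)) a :: pvLabel (4 * (k : Int) + 1) b ::
              pvLabel (4 * (k : Int) + 1 + 1) c :: pvLabel (4 * (k : Int) + 1 + 1 + 1) d ::
              pvLabels (e :: rest) (4 * ((k + 1 : Nat) : Int)) from by
        rw [pvLabels_cons, pvLabels_cons, pvLabels_cons, pvLabels_cons, hstep]]
      rw [pvLabels_cons e]
      simp only [pvChunk4, List.take, List.drop, List.map_cons]
      rw [PySem.Chars.join_cons_cons, pvPiece, pvPiece, pvPiece, pvPiece]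
      simp only [if_neg h0, if_neg h1, if_neg h2, if_pos h3]
      simp [List.append_assoc]

-- "".join is flatten
theorem pvJoin_nil_sep : ∀ (ls : List (List Char)), PySem.Chars.join [] ls = ls.flatten := by
  intro ls
  induction ls with
  | nil => rw [PySem.Chars.join_nil, List.flatten_nil]
  | cons a t ih =>
    cases t with
    | nil => rw [PySem.Chars.join_singleton]; simp
    | cons b t' => rw [PySem.Chars.join_cons_cons, List.flatten_cons, ← ih]; simp

-- B's range/slice chunking is pvChunk4
theorem pvMapRangeChunk {α : Type} : ∀ (c : Nat) (ls : List α),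
    4 * c < ls.length + 4 → ls.length ≤ 4 * c →
    (List.range c).map (fun k => (ls.drop (4 * k)).take 4) = pvChunk4 ls := by
  intro c
  induction c with
  | zero =>
    intro ls _ h2
    have : ls = [] := List.eq_nil_of_length_eq_zero (Nat.le_zero.mp h2)
    subst this; simp [pvChunk4]
  | succ c ih =>
    intro ls h1 h2
    have hpos : 0 < ls.length := by omega
    obtain ⟨a, l, rfl⟩ : ∃ a l, ls = a :: l := by
      cases ls with
      | nil => simp at hpos
      | cons a l => exact ⟨a, l, rfl⟩
    rw [List.range_succ_eq_map, List.map_cons, List.map_map]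
    have htail : (List.range c).map ((fun k => (((a :: l).drop (4 * k)).take 4)) ∘ Nat.succ)
        = (List.range c).map (fun k => (((a :: l).drop 4).drop (4 * k)).take 4) := by
      apply List.map_congr_left
      intro k _
      simp only [Function.comp_apply]
      rw [show 4 * Nat.succ k = 4 * k + 4 from by omega, ← List.drop_drop,
        List.drop_drop, List.drop_drop, Nat.add_comm]
    have hd4 : ((a :: l).drop 4).length = (a :: l).length - 4 := List.length_drop
    rw [htail, ih ((a :: l).drop 4) (by rw [hd4]; omega) (by rw [hd4]; omega)]
    have hdd : (a :: l).drop 4 = l.drop 3 := by simp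
    rw [hdd]
    conv_rhs => rw [pvChunk4]
    simp

theorem pvLines_eq (ls : List (List Char)) :
    (PySem.List.pyRange 0 ls.length 4).map
      (fun j => PySem.Chars.join [] (PySem.List.slice ls (some j) (some (j + 4)))) =
    (pvChunk4 ls).map List.flatten := by
  rw [PySem.List.pyRange_of_pos 0 ls.length (by norm_num), List.map_map]
  set c := (if (0 : Int) < ls.length then (((ls.length : Int) - 0 + 4 - 1) / 4).toNat else 0) with hc
  have hcb1 : 4 * c < ls.length + 4 := by
    rw [hc]; split <;> omega
  have hcb2 : ls.length ≤ 4 * c := by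
    rw [hc]; split <;> omega
  have hmap : (List.range c).map
        ((fun j => PySem.Chars.join [] (PySem.List.slice ls (some j) (some (j + 4)))) ∘
          (fun k : Nat => (0 : Int) + 4 * k))
      = (List.range c).map (fun k => ((ls.drop (4 * k)).take 4).flatten) := by
    apply List.map_congr_left
    intro k _
    simp only [Function.comp]
    have hcast : ((0 : Int) + 4 * (k : Int)) = ((4 * k : Nat) : Int) := by push_cast; ring
    have hcast4 : ((0 : Int) + 4 * (k : Int) + 4) = ((4 * k : Nat) : Int) + ((4 : Nat) : Int) := by
      push_cast; ring
    rw [hcast4, hcast, PySem.List.slice_natCast_add, pvJoin_nil_sep]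
  have hflat : (List.range c).map (fun k => ((ls.drop (4 * k)).take 4).flatten)
      = ((List.range c).map (fun k => (ls.drop (4 * k)).take 4)).map List.flatten := by
    simp [List.map_map, Function.comp]
  rw [hmap, hflat, pvMapRangeChunk c ls hcb1 hcb2]

-- ===== VERDICT (by name: the statement is the Claim_ definition above) =====
theorem render_binary_as_switches_spec : Claim_equal_render_binary_as_switches := by
  intro binary _
  show render_binary_as_switches binary = render_binary_as_switches_alt binary
  unfold render_binary_as_switches render_binary_as_switches_alt
  dsimp only
  rw [pvFold_eq_flatMap]
  have hlab : (PySem.List.enumerate binary.toList 0).map (fun p => pvLabel p.1 p.2)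
      = pvLabels binary.toList 0 := rfl
  rw [hlab]
  have hcore := pvCore binary.toList.length binary.toList 0 le_rfl
  have h00 : (4 * ((0 : Nat) : Int)) = 0 := by norm_num
  rw [h00] at hcore
  rw [hcore, pvLines_eq (pvLabels binary.toList 0)]
  congr 1
  cases hb : binary.toList with
  | nil =>
    simp [pvLabels, pvChunk4, PySem.List.enumerate_nil, PySem.Chars.join_nil,
      PySem.Chars.strip, PySem.Chars.lstrip, PySem.Chars.rstrip]
  | cons x xs =>
    -- the joined lines start with ESC and end with 'm'; strip removes only the optional '\n'
    have hgood : pvGood (PySem.Chars.join ['\n']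
        ((pvChunk4 (pvLabels (x :: xs) 0)).map List.flatten)) := by
      apply pvGood_join
      · rw [pvLabels_cons]
        rw [pvChunk4]
        simp
      · intro L hL
        obtain ⟨cL, hcL, rfl⟩ := List.mem_map.mp hL
        obtain ⟨hne, hsub⟩ := pvChunk4_sound (pvLabels (x :: xs) 0).length
          (pvLabels (x :: xs) 0) le_rfl cL hcL
        apply pvGood_flatten cL hne
        intro L' hL'
        obtain ⟨p, _, rfl⟩ := List.mem_map.mp (hsub L' hL')
        exact ⟨pvLabel_head p.1 p.2, pvLabel_last p.1 p.2⟩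
    split
    · exact pvStrip_good _ hgood _ (Or.inr rfl)
    · exact pvStrip_good _ hgood _ (Or.inl rfl)
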